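-- pv_equiv track=rewrite | github.com/dvir3211/MyProjects | ChessProject/data_set.py | convert_move
-- ===== SOURCE A (Python) =====
-- def convert_move(move):
--     y = -1
--     for i in range(move):
--         if i % 8 == 0:
--             y += 1
--     if y % 2 == 0 and move <= 32:
--         return move - (y * 8) - 1 , y
--     elif  move <= 32:
--         return 8 - (move - y * 8), y
--
--     if y % 2 == 0 and move > 32:
--         return move - (y * 8) , y
--     elif  move > 32:
--         return 8 - (move - y * 8) + 1, y
-- ===== SOURCE B (Python) =====
-- def convert_move(move):
--     # closed form: y = number of multiples of 8 in range(move), minus 1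
--     y = (move - 1) // 8 if move > 0 else -1
--     r = move - 8 * y
--     if y % 2 == 0:
--         x = r if move > 32 else r - 1
--     else:
--         x = 9 - r if move > 32 else 8 - r
--     return x, y
-- ===== Notes on version B (the rewrite author's own statement) =====
-- stated objective: faster
-- what changed: Replaces A's linear counting loop over range(move) with a closed-form floor-division formula for the row index and merges the four return expressions into one row-offset computation.
import Mathlib
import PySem

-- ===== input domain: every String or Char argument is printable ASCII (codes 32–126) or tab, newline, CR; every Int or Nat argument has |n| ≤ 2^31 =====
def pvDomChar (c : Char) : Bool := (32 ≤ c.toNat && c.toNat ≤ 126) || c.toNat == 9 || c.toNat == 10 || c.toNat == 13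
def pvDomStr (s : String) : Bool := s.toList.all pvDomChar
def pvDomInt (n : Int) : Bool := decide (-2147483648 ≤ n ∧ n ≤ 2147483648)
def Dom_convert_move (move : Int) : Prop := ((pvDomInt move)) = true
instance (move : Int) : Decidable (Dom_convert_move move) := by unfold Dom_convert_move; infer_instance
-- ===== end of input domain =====

-- B replaces A's counting loop over range(move) by closed-form floor-division arithmetic (O(1) instead of O(move)).

-- ===== PORT A =====
-- the loop 'y = -1; for i in range(move): if i % 8 == 0: y += 1'
def pvLoopY (move : Int) : Int :=
  (PySem.List.pyRange 0 move 1).foldl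
    (fun y i => if PySem.Int.mod i 8 = 0 then y + 1 else y) (-1)

def convert_move (move : Int) : List Int :=
  let y := pvLoopY move
  if PySem.Int.mod y 2 = 0 ∧ move ≤ 32 then [move - (y * 8) - 1, y]
  else if move ≤ 32 then [8 - (move - y * 8), y]
  else if PySem.Int.mod y 2 = 0 ∧ move > 32 then [move - (y * 8), y]
  else if move > 32 then [8 - (move - y * 8) + 1, y]
  else []  -- Python falls off the end here (unreachable: move ≤ 32 already returned above)

-- ===== PORT B =====
def convert_move_alt (move : Int) : List Int :=
  let y := if move > 0 then PySem.Int.floordiv (move - 1) 8 else -1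
  let r := move - 8 * y
  let x := if PySem.Int.mod y 2 = 0 then (if move > 32 then r else r - 1)
           else (if move > 32 then 9 - r else 8 - r)
  [x, y]

-- ===== PRECONDITION & SPEC =====
def Spec_convert_move (move : Int) (out : List Int) : Prop := out = convert_move_alt move
instance (move : Int) (out : List Int) : Decidable (Spec_convert_move move out) := by unfold Spec_convert_move; infer_instance

-- ===== CLAIM (what is proved, stated in full; the proofs are below) =====
def Claim_equal_convert_move : Prop := ∀ (move : Int), Dom_convert_move move → Spec_convert_move move (convert_move move)

-- ===== LEMMAS AND PROOFS =====

lemma pvLoopY_nat (n : Nat) :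
    pvLoopY (n : Int) = (((n + 7) / 8 : Nat) : Int) - 1 := by
  induction n with
  | zero => simp [pvLoopY, PySem.List.pyRange_one_eq_nil]
  | succ n ih =>
    have h : PySem.List.pyRange 0 ((n : Int) + 1) 1
        = PySem.List.pyRange 0 (n : Int) 1 ++ [(n : Int)] :=
      PySem.List.pyRange_one_succ_right (by positivity)
    unfold pvLoopY at ih ⊢
    push_cast
    rw [h, List.foldl_append, ih]
    have hm : PySem.Int.mod (n : Int) 8 = (((n % 8 : Nat)) : Int) :=
      PySem.Int.mod_natCast n 8
    simp only [List.foldl, hm]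
    split_ifs with h0 <;> omega

lemma pvLoopY_eq (move : Int) :
    pvLoopY move = if move > 0 then PySem.Int.floordiv (move - 1) 8 else -1 := by
  by_cases h : move > 0
  · have hmn : move = (move.toNat : Int) := by omega
    rw [if_pos h, hmn, pvLoopY_nat]
    rw [PySem.Int.floordiv_eq_ediv_of_pos (by norm_num)]
    omega
  · rw [if_neg h]
    unfold pvLoopY
    rw [PySem.List.pyRange_one_eq_nil (by omega)]
    rfl

-- ===== VERDICT (by name: the statement is the Claim_ definition above) =====
theorem convert_move_spec : Claim_equal_convert_move := by
  intro move _
  unfold Spec_convert_move convert_move convert_move_alt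
  rw [pvLoopY_eq]
  by_cases hp : move > 0 <;> by_cases h32 : move ≤ 32 <;>
    simp only [hp, h32, if_pos, if_neg, if_false, gt_iff_lt, not_lt] <;>
    split_ifs <;> simp_all <;> omega
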